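-- pv_equiv track=rewrite | github.com/JamiePlace/AdventOfCode-23 | problem_5/main.py | convert_seeds_part2
-- ===== SOURCE A (Python) =====
-- def convert_seeds_part2(seeds):
--     seed_output = []
--     for i, seed in enumerate(seeds):
--         if i % 2 == 0:
--             start_seed = seed
--         else:
--             seed_output.extend(list(range(start_seed, start_seed + seed)))
--     return seed_output
-- ===== SOURCE B (Python) =====
-- def convert_seeds_part2(seeds):
--     # Flat single-loop state machine: emits one seed per iteration; when the
--     # current run is exhausted it loads the next (start, length) pair.
--     out = []
--     i = 0
--     cur = 0
--     remaining = 0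
--     while True:
--         if remaining > 0:
--             out.append(cur)
--             cur += 1
--             remaining -= 1
--         elif i + 1 < len(seeds):
--             cur = seeds[i]
--             remaining = seeds[i + 1]
--             i += 2
--         else:
--             return out
-- ===== Notes on version B (the rewrite author's own statement) =====
-- stated objective: alternative
-- what changed: Replaces the indexed parity-branch loop that materialises and extends a range list per pair with a flat single-loop state machine holding (index, current value, remaining count) that emits exactly one output element per iteration and loads the next (start, length) pair only when the current run is exhausted; no range objects and no nested loop.
import Mathlib
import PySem

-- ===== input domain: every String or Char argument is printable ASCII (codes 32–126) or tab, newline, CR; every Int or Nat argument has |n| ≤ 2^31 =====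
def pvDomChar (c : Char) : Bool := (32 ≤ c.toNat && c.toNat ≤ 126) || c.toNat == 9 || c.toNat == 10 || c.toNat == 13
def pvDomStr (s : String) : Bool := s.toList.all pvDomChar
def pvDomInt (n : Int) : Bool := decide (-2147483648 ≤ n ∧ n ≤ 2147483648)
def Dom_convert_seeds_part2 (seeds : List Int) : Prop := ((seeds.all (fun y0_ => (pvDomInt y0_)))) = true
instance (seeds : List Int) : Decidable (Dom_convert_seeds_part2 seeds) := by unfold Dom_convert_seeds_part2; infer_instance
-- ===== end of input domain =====

-- B is an alternative decomposition: a flat state machine emitting one element per step.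

-- ===== PORT A =====
-- loop 'for i, seed in enumerate(seeds)' with the i%2 parity branch and persistent start_seed
def goA_convert_seeds_part2 : List Int → Nat → Int → List Int → List Int
  | [], _, _, out => out
  | seed :: rest, i, start, out =>
    if i % 2 == 0 then goA_convert_seeds_part2 rest (i + 1) seed out
    else goA_convert_seeds_part2 rest (i + 1) start
           (out ++ PySem.List.pyRange start (start + seed) 1)

def convert_seeds_part2 (seeds : List Int) : List Int :=
  goA_convert_seeds_part2 seeds 0 0 []

-- ===== PORT B =====
-- 'while True' state machine: (rest of the seed list standing for index i, cur, remaining, out);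
-- emits one element per step while remaining > 0, else loads the next two elements as (cur, remaining).
def goB_convert_seeds_part2 (rest : List Int) (cur rem : Int) (out : List Int) : List Int :=
  if 0 < rem then goB_convert_seeds_part2 rest (cur + 1) (rem - 1) (out ++ [cur])
  else
    match rest with
    | a :: b :: r => goB_convert_seeds_part2 r a b out
    | _ => out
termination_by (rest.length, rem.toNat)
decreasing_by
  · right; omega
  · left; simp

def convert_seeds_part2_alt (seeds : List Int) : List Int :=
  goB_convert_seeds_part2 seeds 0 0 []

-- ===== PRECONDITION & SPEC =====
def Spec_convert_seeds_part2 (seeds : List Int) (out : List Int) : Prop := out = convert_seeds_part2_alt seeds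
instance (seeds : List Int) (out : List Int) : Decidable (Spec_convert_seeds_part2 seeds out) := by unfold Spec_convert_seeds_part2; infer_instance

-- ===== CLAIM (what is proved, stated in full; the proofs are below) =====
def Claim_equal_convert_seeds_part2 : Prop := ∀ (seeds : List Int), Dom_convert_seeds_part2 seeds → Spec_convert_seeds_part2 seeds (convert_seeds_part2 seeds)

-- ===== LEMMAS AND PROOFS =====
-- proof-only helper: the (start, length) pairs of the list, lone trailing element dropped
def pairUp_convert_seeds_part2 : List Int → List (Int × Int)
  | a :: b :: rest => (a, b) :: pairUp_convert_seeds_part2 rest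
  | _ => []

lemma goA_even (seeds : List Int) :
    ∀ (i : Nat) (start : Int) (out : List Int), i % 2 = 0 →
      goA_convert_seeds_part2 seeds i start out
        = out ++ (pairUp_convert_seeds_part2 seeds).flatMap
            (fun p => PySem.List.pyRange p.1 (p.1 + p.2) 1) := by
  induction seeds using pairUp_convert_seeds_part2.induct with
  | case1 a b rest ih =>
    intro i start out hi
    have h1 : i % 2 == 0 := by simp [hi]
    have h2 : ¬ ((i + 1) % 2 == 0) := by simp; omega
    have h3 : (i + 2) % 2 = 0 := by omega
    simp only [goA_convert_seeds_part2, h1]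
    simp only [show i + 1 + 1 = i + 2 from rfl, ih (i + 2) a _ h3,
      pairUp_convert_seeds_part2, List.flatMap_cons, List.append_assoc]
    simp [h2]
  | case2 xs h =>
    intro i start out hi
    match xs, h with
    | [], _ =>
      simp [goA_convert_seeds_part2, pairUp_convert_seeds_part2]
    | [a], _ =>
      have h1 : i % 2 == 0 := by simp [hi]
      simp [goA_convert_seeds_part2, h1, pairUp_convert_seeds_part2]
    | a :: b :: r, h => exact absurd rfl (h a b r)

lemma goB_eq (rest : List Int) (cur rem : Int) (out : List Int) :
    goB_convert_seeds_part2 rest cur rem out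
      = out ++ PySem.List.pyRange cur (cur + rem) 1
            ++ (pairUp_convert_seeds_part2 rest).flatMap
                 (fun p => PySem.List.pyRange p.1 (p.1 + p.2) 1) := by
  induction rest, cur, rem, out using goB_convert_seeds_part2.induct with
  | case1 rest cur rem out hpos ih =>
    rw [goB_convert_seeds_part2.eq_def]
    simp only [hpos, if_true]
    rw [ih, PySem.List.pyRange_one_cons (by omega : cur < cur + rem)]
    have : cur + 1 + (rem - 1) = cur + rem := by ring
    simp [this, List.append_assoc]
  | case2 cur rem out hpos a b r ih =>
    rw [goB_convert_seeds_part2.eq_def]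
    simp only [hpos, if_false]
    rw [ih, PySem.List.pyRange_one_eq_nil (by omega : cur + rem ≤ cur)]
    simp [pairUp_convert_seeds_part2, List.append_assoc]
  | case3 rest cur rem out hpos h =>
    rw [goB_convert_seeds_part2.eq_def]
    simp only [hpos, if_false]
    rw [PySem.List.pyRange_one_eq_nil (by omega : cur + rem ≤ cur)]
    match rest, h with
    | [], _ => simp [pairUp_convert_seeds_part2]
    | [a], _ => simp [pairUp_convert_seeds_part2]
    | a :: b :: r, h => exact absurd rfl (h a b r)

-- ===== VERDICT (by name: the statement is the Claim_ definition above) =====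
theorem convert_seeds_part2_spec : Claim_equal_convert_seeds_part2 := by
  intro seeds _
  unfold Spec_convert_seeds_part2 convert_seeds_part2 convert_seeds_part2_alt
  rw [goB_eq, goA_even seeds 0 0 [] rfl,
    PySem.List.pyRange_one_eq_nil (by omega : (0:Int) + 0 ≤ 0)]
  simp
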